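-- pv_equiv track=rewrite | github.com/chente1510/Ejercicios_Plus | EJERCICIO 6.PY | decimal_to_base_seven
-- ===== SOURCE A (Python) =====
-- def decimal_to_base_seven(decimal_num):
--     if decimal_num == 0:
--         return '0'  # Caso especial cuando el número es cero
--
--     base_seven_num = ''
--     is_negative = False
--
--     if decimal_num < 0:
--         is_negative = True
--         decimal_num = abs(decimal_num)
--
--     while decimal_num > 0:
--         remainder = decimal_num % 7
--         base_seven_num = str(remainder) + base_seven_num
--         decimal_num = decimal_num // 7
--
--     if is_negative:
--         base_seven_num = '-' + base_seven_num
--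
--     return base_seven_num
-- ===== SOURCE B (Python) =====
-- def decimal_to_base_seven(decimal_num):
--     # MSB-first: find the largest power of 7 <= n, then emit digits high-to-low.
--     if decimal_num == 0:
--         return '0'
--     sign = ''
--     n = decimal_num
--     if n < 0:
--         sign = '-'
--         n = -n
--     power = 1
--     while power * 7 <= n:
--         power = power * 7
--     out = sign
--     while power > 0:
--         out = out + str(n // power)
--         n = n % power
--         power = power // 7
--     return out
-- ===== Notes on version B (the rewrite author's own statement) =====
-- stated objective: alternative
-- what changed: Replaces A's least-significant-first loop that prepends remainders to the front of the string with an MSB-first algorithm: first find the largest power of 7 not exceeding |n|, then walk the powers downward appending each quotient digit and reducing n modulo the power.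
import Mathlib
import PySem

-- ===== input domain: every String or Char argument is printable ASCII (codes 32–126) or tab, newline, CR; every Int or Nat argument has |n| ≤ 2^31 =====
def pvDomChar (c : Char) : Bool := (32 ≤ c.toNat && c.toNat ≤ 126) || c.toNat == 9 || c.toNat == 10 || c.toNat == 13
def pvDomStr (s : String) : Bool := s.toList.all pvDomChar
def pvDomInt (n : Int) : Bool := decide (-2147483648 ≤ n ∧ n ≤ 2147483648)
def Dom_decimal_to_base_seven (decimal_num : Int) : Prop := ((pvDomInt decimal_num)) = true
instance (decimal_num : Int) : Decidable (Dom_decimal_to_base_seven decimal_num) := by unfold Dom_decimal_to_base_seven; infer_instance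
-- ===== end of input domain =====

-- B replaces A's LSB-first remainder-prepending loop with an MSB-first traversal over descending powers of 7; same return values.


-- ===== PORT A =====
-- the while-loop of A: state = (decimal_num, base_seven_num)
def pvALoop (n : Int) (acc : String) : String :=
  if _h : n > 0 then
    pvALoop (PySem.Int.floordiv n 7) (PySem.Int.toStr (PySem.Int.mod n 7) ++ acc)
  else acc
termination_by n.toNat
decreasing_by
  have h7 : PySem.Int.floordiv n 7 = n / 7 := PySem.Int.floordiv_eq_ediv_of_pos (by omega)
  have : n / 7 < n := by omega
  have : 0 ≤ n / 7 := by omega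
  omega

def decimal_to_base_seven (decimal_num : Int) : String :=
  if decimal_num == 0 then "0"
  else
    let is_negative := decimal_num < 0
    let m := if is_negative then |decimal_num| else decimal_num
    let base_seven_num := pvALoop m ""
    if is_negative then "-" ++ base_seven_num else base_seven_num

-- ===== PORT B =====
-- 'while power * 7 <= n: power = power * 7'; the 0 < p conjunct only makes the loop total (B only calls it with power = 1)
def pvFindPow (n p : Int) : Int :=
  if _h : 0 < p ∧ p * 7 ≤ n then pvFindPow n (p * 7) else p
termination_by (n - p).toNat
decreasing_by omega

-- 'while power > 0: out = out + str(n // power); n = n % power; power = power // 7'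
def pvEmit (n p : Int) (out : String) : String :=
  if h : 0 < p then
    pvEmit (PySem.Int.mod n p) (PySem.Int.floordiv p 7)
      (out ++ PySem.Int.toStr (PySem.Int.floordiv n p))
  else out
termination_by p.toNat
decreasing_by
  have h7 : PySem.Int.floordiv p 7 = p / 7 := PySem.Int.floordiv_eq_ediv_of_pos (by omega)
  have : p / 7 < p := by omega
  have : 0 ≤ p / 7 := by omega
  omega

def decimal_to_base_seven_alt (decimal_num : Int) : String :=
  if decimal_num == 0 then "0"
  else
    let sign := if decimal_num < 0 then "-" else ""
    let n := if decimal_num < 0 then -decimal_num else decimal_num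
    pvEmit n (pvFindPow n 1) sign

-- ===== PRECONDITION & SPEC =====
def Spec_decimal_to_base_seven (decimal_num : Int) (out : String) : Prop := out = decimal_to_base_seven_alt decimal_num
instance (decimal_num : Int) (out : String) : Decidable (Spec_decimal_to_base_seven decimal_num out) := by unfold Spec_decimal_to_base_seven; infer_instance

-- ===== CLAIM (what is proved, stated in full; the proofs are below) =====
def Claim_equal_decimal_to_base_seven : Prop := ∀ (decimal_num : Int), Dom_decimal_to_base_seven decimal_num → Spec_decimal_to_base_seven decimal_num (decimal_to_base_seven decimal_num)


-- ===== LEMMAS AND PROOFS =====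
-- fixed-width (m digits, leading zeros) base-7 representation, LSB-peeling definition
def padDigits : Nat → Int → String
  | 0, _ => ""
  | (m+1), n => padDigits m (n / 7) ++ PySem.Int.toStr (n % 7)

-- padDigits can also be peeled at the most significant digit
theorem padDigits_split (m : Nat) : ∀ n : Int, 0 ≤ n → n < 7 ^ (m + 1) →
    padDigits (m + 1) n = PySem.Int.toStr (n / 7 ^ m) ++ padDigits m (n % 7 ^ m) := by
  induction m with
  | zero =>
    intro n hn h7
    norm_num at h7
    have h1 : n % 7 = n := by omega
    have h2 : n % 1 = 0 := by omega
    simp [padDigits, h1]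
  | succ m ih =>
    intro n hn h7
    have hP : (0:ℤ) < 7 ^ m := by positivity
    have hpow : (7:ℤ) ^ (m + 1) = 7 * 7 ^ m := by rw [pow_succ]; ring
    have hdivlt : n / 7 < 7 ^ (m + 1) := by
      rw [Int.ediv_lt_iff_lt_mul (by norm_num)]
      calc n < 7 ^ (m + 1 + 1) := h7
        _ = 7 ^ (m+1) * 7 := by rw [pow_succ]
    have ha : n / 7 / 7 ^ m = n / 7 ^ (m + 1) := by
      rw [Int.ediv_ediv_of_nonneg (by norm_num), ← hpow]
    have hb : n / 7 % 7 ^ m = n % 7 ^ (m + 1) / 7 := by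
      rw [Int.emod_def, Int.emod_def, hpow]
      have e : n - 7 * 7 ^ m * (n / (7 * 7 ^ m)) = n + (-(7 ^ m * (n / (7 * 7 ^ m)))) * 7 := by
        ring
      rw [e, Int.add_mul_ediv_right _ _ (by norm_num : (7:ℤ) ≠ 0),
        ← Int.ediv_ediv_of_nonneg (by norm_num : (0:ℤ) ≤ 7)]
      ring
    have hc : n % 7 ^ (m + 1) % 7 = n % 7 :=
      Int.emod_emod_of_dvd n (dvd_pow_self 7 (Nat.succ_ne_zero m))
    calc padDigits (m + 1 + 1) n
        = padDigits (m + 1) (n / 7) ++ PySem.Int.toStr (n % 7) := by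
          simp [padDigits]
      _ = (PySem.Int.toStr (n / 7 / 7 ^ m) ++ padDigits m (n / 7 % 7 ^ m))
            ++ PySem.Int.toStr (n % 7) := by
          rw [ih (n / 7) (by omega) hdivlt]
      _ = PySem.Int.toStr (n / 7 ^ (m + 1)) ++ padDigits (m + 1) (n % 7 ^ (m + 1)) := by
          rw [ha, hb, ← hc]
          simp [padDigits, String.append_assoc]

-- B's emit loop started at 7^k writes the k+1 digits of n (leading zeros included)
theorem emit_eq (k : Nat) : ∀ (n : Int) (acc : String), 0 ≤ n → n < 7 ^ (k + 1) →
    pvEmit n (7 ^ k) acc = acc ++ padDigits (k + 1) n := by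
  induction k with
  | zero =>
    intro n acc hn h7
    norm_num at h7 ⊢
    have hm : PySem.Int.mod n 1 = 0 := by
      rw [PySem.Int.mod_eq_emod_of_pos (by norm_num)]; omega
    have hd1 : PySem.Int.floordiv (1:Int) 7 = 0 := by
      rw [PySem.Int.floordiv_eq_ediv_of_pos (by norm_num)]; decide
    have hdn : PySem.Int.floordiv n 1 = n := by
      rw [PySem.Int.floordiv_eq_ediv_of_pos (by norm_num)]; omega
    rw [pvEmit, dif_pos (by norm_num : (0:ℤ) < 1), hm, hd1, hdn, pvEmit,
      dif_neg (by norm_num : ¬ (0:ℤ) < 0)]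
    have h1 : n % 7 = n := by omega
    simp [padDigits, h1]
  | succ k ih =>
    intro n acc hn h7
    have hP : (0:ℤ) < 7 ^ (k + 1) := by positivity
    have hmod : PySem.Int.mod n (7 ^ (k + 1)) = n % 7 ^ (k + 1) :=
      PySem.Int.mod_eq_emod_of_pos hP
    have hdiv : PySem.Int.floordiv n (7 ^ (k + 1)) = n / 7 ^ (k + 1) :=
      PySem.Int.floordiv_eq_ediv_of_pos hP
    have hp7 : PySem.Int.floordiv (7 ^ (k + 1) : Int) 7 = 7 ^ k := by
      rw [PySem.Int.floordiv_eq_ediv_of_pos (by norm_num), pow_succ,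
        Int.mul_ediv_cancel _ (by norm_num)]
    rw [pvEmit, dif_pos hP, hmod, hdiv, hp7,
      ih (n % 7 ^ (k + 1)) _ (Int.emod_nonneg n (by positivity)) (Int.emod_lt_of_pos n hP),
      padDigits_split (k + 1) n hn h7, String.append_assoc]

-- A's loop on 7^k ≤ n < 7^(k+1) writes those same k+1 digits in front of acc
theorem aloop_eq (k : Nat) : ∀ (n : Int) (acc : String), 7 ^ k ≤ n → n < 7 ^ (k + 1) →
    pvALoop n acc = padDigits (k + 1) n ++ acc := by
  induction k with
  | zero =>
    intro n acc h1 h7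
    norm_num at h1 h7
    have hd : PySem.Int.floordiv n 7 = 0 := by
      rw [PySem.Int.floordiv_eq_ediv_of_pos (by norm_num)]; omega
    have hm : PySem.Int.mod n 7 = n % 7 := PySem.Int.mod_eq_emod_of_pos (by norm_num)
    rw [pvALoop, dif_pos (by omega : n > 0), hd, hm, pvALoop,
      dif_neg (by norm_num : ¬ (0:ℤ) > 0)]
    simp [padDigits]
  | succ k ih =>
    intro n acc h1 h7
    have hpos : (0:ℤ) < n := lt_of_lt_of_le (by positivity) h1
    have hd : PySem.Int.floordiv n 7 = n / 7 := PySem.Int.floordiv_eq_ediv_of_pos (by norm_num)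
    have hm : PySem.Int.mod n 7 = n % 7 := PySem.Int.mod_eq_emod_of_pos (by norm_num)
    have hlo : 7 ^ k ≤ n / 7 := by
      rw [Int.le_ediv_iff_mul_le (by norm_num)]
      calc (7:ℤ) ^ k * 7 = 7 ^ (k + 1) := by rw [pow_succ]
        _ ≤ n := h1
    have hhi : n / 7 < 7 ^ (k + 1) := by
      rw [Int.ediv_lt_iff_lt_mul (by norm_num)]
      calc n < 7 ^ (k + 1 + 1) := h7
        _ = 7 ^ (k + 1) * 7 := by rw [pow_succ]
    rw [pvALoop, dif_pos hpos, hd, hm, ih (n / 7) _ hlo hhi]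
    simp [padDigits, String.append_assoc]

-- B's power search returns the largest power of 7 not exceeding n
theorem findPow_eq (n : Int) : ∀ (fuel : Nat) (p : Int), (n - p).toNat ≤ fuel → 0 < p → p ≤ n →
    ∃ k : Nat, pvFindPow n p = p * 7 ^ k ∧ p * 7 ^ k ≤ n ∧ n < p * 7 ^ (k + 1) := by
  intro fuel
  induction fuel with
  | zero =>
    intro p hf hp hpn
    rw [pvFindPow, dif_neg (by omega)]
    exact ⟨0, by ring, by simpa using hpn, by rw [show p * 7 ^ (0+1) = p * 7 by ring]; omega⟩
  | succ fuel ih =>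
    intro p hf hp hpn
    rw [pvFindPow]
    by_cases h : p * 7 ≤ n
    · rw [dif_pos ⟨hp, h⟩]
      obtain ⟨k, e, lo, hi⟩ := ih (p * 7) (by omega) (by omega) h
      refine ⟨k + 1, ?_, ?_, ?_⟩
      · rw [e, pow_succ]; ring
      · rw [show p * 7 ^ (k + 1) = p * 7 * 7 ^ k by rw [pow_succ 7 k]; ring]; exact lo
      · rw [show p * 7 ^ (k + 1 + 1) = p * 7 * 7 ^ (k + 1) by rw [pow_succ 7 (k+1)]; ring]
        exact hi
    · rw [dif_neg (by tauto)]
      exact ⟨0, by ring, by simpa using hpn, by rw [show p * 7 ^ (0+1) = p * 7 by ring]; omega⟩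

-- for positive m, B's two loops produce the sign followed by A's digit string
theorem pos_case (m : Int) (hm : 0 < m) (s : String) :
    pvEmit m (pvFindPow m 1) s = s ++ pvALoop m "" := by
  obtain ⟨k, e, lo, hi⟩ := findPow_eq m (m - 1).toNat 1 (by omega) one_pos (by omega)
  rw [one_mul] at e lo hi
  rw [e, emit_eq k m s (by omega) hi, aloop_eq k m "" lo hi]
  simp

-- ===== VERDICT (by name: the statement is the Claim_ definition above) =====
theorem decimal_to_base_seven_spec : Claim_equal_decimal_to_base_seven := by
  intro n _
  unfold Spec_decimal_to_base_seven decimal_to_base_seven decimal_to_base_seven_alt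
  by_cases h0 : n = 0
  · simp [h0]
  · simp only [beq_iff_eq, h0, if_false]
    by_cases hneg : n < 0
    · simp only [hneg, if_true, abs_of_neg hneg]
      exact (pos_case (-n) (by omega) "-").symm
    · simp only [hneg, if_false]
      rw [pos_case n (by omega) ""]
      simp
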